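-- pv_equiv track=rewrite | github.com/pypi-data/pypi-mirror-401 | packages/papylio/papylio-0.9.1.tar.gz/papylio-0.9.1/papylio/plugins/holliday_junction/sequence_generation.py | sequence_subset_with_comparable_structure
-- ===== SOURCE A (Python) =====
-- def sequence_subset_with_comparable_structure(sequence_subset):
--     # sequence_subset = sequence_subset[7] + sequence_subset[:7]
--     sequence_subsets = []
--     for i in range(4):
--         sequence_subsets.append(sequence_subset[i*2:] + sequence_subset[:i*2])
--     for ss in sequence_subsets.copy():
--         change_base_within_basepair = str.maketrans('CG', 'GC')
--         sequence_subsets.append(ss.translate(change_base_within_basepair))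
--     for ss in sequence_subsets.copy():
--         change_base_within_basepair = str.maketrans('AT', 'TA')
--         sequence_subsets.append(ss.translate(change_base_within_basepair))
--     for ss in sequence_subsets.copy():
--         switch_base_pairs = str.maketrans('ATCG', 'GCAT')
--         sequence_subsets.append(ss.translate(switch_base_pairs))
--     return set(sequence_subsets)
-- ===== SOURCE B (Python) =====
-- def sequence_subset_with_comparable_structure(sequence_subset):
--     # Direct nested enumeration: 4 rotations x 8 transformation subsets,
--     # each chosen transformation applied in the fixed order t1 -> t2 -> t3.
--     rotations = [sequence_subset[i * 2:] + sequence_subset[:i * 2] for i in range(4)]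
--     t1 = str.maketrans('CG', 'GC')
--     t2 = str.maketrans('AT', 'TA')
--     t3 = str.maketrans('ATCG', 'GCAT')
--     variants = set()
--     for use_t3 in (False, True):
--         for use_t2 in (False, True):
--             for use_t1 in (False, True):
--                 for rot in rotations:
--                     s = rot
--                     if use_t1:
--                         s = s.translate(t1)
--                     if use_t2:
--                         s = s.translate(t2)
--                     if use_t3:
--                         s = s.translate(t3)
--                     variants.add(s)
--     return variants
-- ===== Notes on version B (the rewrite author's own statement) =====
-- stated objective: alternative
-- what changed: Replaces the three progressive list-doubling passes (each appending a translated copy of the list so far) with a direct nested enumeration: for each of the 8 transformation subsets, each chosen translation is applied in the fixed order t1->t2->t3 to each of the 4 rotations.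
import Mathlib
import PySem

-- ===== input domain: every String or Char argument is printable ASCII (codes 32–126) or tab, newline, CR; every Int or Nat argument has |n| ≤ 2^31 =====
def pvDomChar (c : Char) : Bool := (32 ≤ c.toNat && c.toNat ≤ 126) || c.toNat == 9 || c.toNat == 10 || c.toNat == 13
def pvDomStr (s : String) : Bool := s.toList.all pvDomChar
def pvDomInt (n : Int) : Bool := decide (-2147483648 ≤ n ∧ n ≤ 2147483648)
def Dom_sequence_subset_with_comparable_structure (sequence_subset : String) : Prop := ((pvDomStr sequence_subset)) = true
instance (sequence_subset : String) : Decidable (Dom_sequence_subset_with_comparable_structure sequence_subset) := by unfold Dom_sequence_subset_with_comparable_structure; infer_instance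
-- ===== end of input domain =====

-- B replaces A's three progressive list-doubling passes by a direct nested enumeration
-- of rotations x transformation subsets (objective: alternative decomposition, same cost).

-- str.translate with a Char->Char table built by str.maketrans: exact, each character is
-- replaced by its image under the table (first match) or kept unchanged.
def pvTranslate (tbl : List (Char × Char)) (s : String) : String :=
  String.ofList (s.toList.map (fun c => (((tbl.find? (fun p => p.1 == c)).map Prod.snd).getD c)))

-- ===== PORT A =====
def sequence_subset_with_comparable_structure (sequence_subset : String) : List String :=
  -- for i in range(4): append(sequence_subset[i*2:] + sequence_subset[:i*2])
  let l0 : List String := (PySem.List.pyRange 0 4 1).foldl (fun acc i =>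
      acc ++ [String.ofList (PySem.List.slice sequence_subset.toList (some (i * 2)) none ++
                         PySem.List.slice sequence_subset.toList none (some (i * 2)))]) []
  -- for ss in copy: append(ss.translate(maketrans('CG','GC')))
  let l1 : List String := l0.foldl (fun acc ss => acc ++ [pvTranslate [('C','G'),('G','C')] ss]) l0
  -- for ss in copy: append(ss.translate(maketrans('AT','TA')))
  let l2 : List String := l1.foldl (fun acc ss => acc ++ [pvTranslate [('A','T'),('T','A')] ss]) l1
  -- for ss in copy: append(ss.translate(maketrans('ATCG','GCAT')))
  let l3 : List String := l2.foldl (fun acc ss => acc ++ [pvTranslate [('A','G'),('T','C'),('C','A'),('G','T')] ss]) l2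
  PySem.Set.ofList l3

-- ===== PORT B =====
def sequence_subset_with_comparable_structure_alt (sequence_subset : String) : List String :=
  let rotations : List String := (PySem.List.pyRange 0 4 1).map (fun i =>
      String.ofList (PySem.List.slice sequence_subset.toList (some (i * 2)) none ++
                 PySem.List.slice sequence_subset.toList none (some (i * 2))))
  [false, true].foldl (fun vs use_t3 =>
    [false, true].foldl (fun vs use_t2 =>
      [false, true].foldl (fun vs use_t1 =>
        rotations.foldl (fun vs rot =>
          let s := rot
          let s := if use_t1 then pvTranslate [('C','G'),('G','C')] s else s
          let s := if use_t2 then pvTranslate [('A','T'),('T','A')] s else s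
          let s := if use_t3 then pvTranslate [('A','G'),('T','C'),('C','A'),('G','T')] s else s
          PySem.Set.add vs s) vs) vs) vs) PySem.Set.empty

-- ===== PRECONDITION & SPEC =====
def Spec_sequence_subset_with_comparable_structure (sequence_subset : String) (out : List String) : Prop := out = sequence_subset_with_comparable_structure_alt sequence_subset
instance (sequence_subset : String) (out : List String) : Decidable (Spec_sequence_subset_with_comparable_structure sequence_subset out) := by unfold Spec_sequence_subset_with_comparable_structure; infer_instance

-- ===== CLAIM (what is proved, stated in full; the proofs are below) =====
def Claim_equal_sequence_subset_with_comparable_structure : Prop := ∀ (sequence_subset : String), Dom_sequence_subset_with_comparable_structure sequence_subset → Spec_sequence_subset_with_comparable_structure sequence_subset (sequence_subset_with_comparable_structure sequence_subset)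

-- ===== LEMMAS AND PROOFS =====
theorem pvRange4 : PySem.List.pyRange 0 4 1 = [0, 1, 2, 3] := by decide

-- ===== VERDICT (by name: the statement is the Claim_ definition above) =====
theorem sequence_subset_with_comparable_structure_spec : Claim_equal_sequence_subset_with_comparable_structure := by
  intro s _
  unfold Spec_sequence_subset_with_comparable_structure
  unfold sequence_subset_with_comparable_structure sequence_subset_with_comparable_structure_alt
  simp only [pvRange4, List.foldl, List.map, PySem.Set.ofList_eq_foldl]
  norm_num
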